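-- pv_equiv track=rewrite | github.com/rajeevsharmacoder/IntermediatePythonExamples | practice_3.py | calculate_maximum_sum_possible
-- ===== SOURCE A (Python) =====
-- from itertools import combinations
--
-- def sigma_sum(arr):
--     sigma = 0
--     for i in range(len(arr)):
--         sigma += (arr[i] * (i + 1))
--     return sigma
--
-- def calculate_maximum_sum_possible(A, N):
--     negatives = []
--     positives = []
--     for i in range(N):
--         if A[i] < 0:
--             negatives.append(A[i])
--         else:
--             positives.append(A[i])
--     if len(negatives) == N:
--         return 0
--     if len(positives) == N:
--         return sum(A)
--     negative_possibilities = []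
--     sigma_list = []
--     sigma_list.append(sigma_sum(A))
--     for i in range(len(negatives)):
--         negative_possibilities.append(combinations(negatives, i + 1))
--     for comb in negative_possibilities:
--         for tup in comb:
--             B = A.copy()
--             for value in tup:
--                 B.remove(value)
--             sigma_list.append(sigma_sum(B))
--     return max(sigma_list)
-- ===== SOURCE B (Python) =====
-- def calculate_maximum_sum_possible(A, N):
--     # Count each distinct negative value of the considered prefix once: removing a
--     # combination of equal negative values always deletes the same (earliest)
--     # occurrences, so only the COUNT of each distinct negative value removed matters.
--     # Enumerate count vectors (prod(m_v + 1) candidates instead of 2^m combinations),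
--     # deriving each candidate incrementally from the previous one by one removal.
--     counts = {}
--     nneg = 0
--     for v in (A[:N] if N > 0 else []):
--         if v < 0:
--             counts[v] = counts.get(v, 0) + 1
--             nneg += 1
--     if nneg == N:
--         return 0
--     candidates = [list(A)]
--     for v, m in counts.items():
--         new = []
--         for c in candidates:
--             new.append(c)
--             for _ in range(m):
--                 c = c.copy()
--                 c.remove(v)
--                 new.append(c)
--         candidates = new
--     best = None
--     for c in candidates:
--         s = 0
--         for i, x in enumerate(c):
--             s += x * (i + 1)
--         if best is None or s > best:
--             best = s
--     return best
-- ===== Notes on version B (the rewrite author's own statement) =====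
-- stated objective: alternative
-- what changed: B replaces A's size-by-size enumeration of itertools.combinations of the negatives (each tuple rebuilding a copy of A and calling list.remove per element) by one dict pass that counts each distinct negative value of the considered prefix, followed by an iterative-doubling enumeration of removal-count vectors in which every candidate list is derived from an existing one by a single removal; equal negative values are collapsed and the separate positives list and all-positives shortcut disappear.
-- intended difference: On inputs whose first N entries (N >= 1) are all nonnegative and which have a nonzero entry after index 0, A returns the plain sum(A) while B returns the position-weighted sum it maximises everywhere else; the weighted sum is the intended value (A's sum(A) shortcut forgets the weights). — e.g. on calculate_maximum_sum_possible([0, 1], 2): A returns 1, B returns 2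
import Mathlib
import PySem

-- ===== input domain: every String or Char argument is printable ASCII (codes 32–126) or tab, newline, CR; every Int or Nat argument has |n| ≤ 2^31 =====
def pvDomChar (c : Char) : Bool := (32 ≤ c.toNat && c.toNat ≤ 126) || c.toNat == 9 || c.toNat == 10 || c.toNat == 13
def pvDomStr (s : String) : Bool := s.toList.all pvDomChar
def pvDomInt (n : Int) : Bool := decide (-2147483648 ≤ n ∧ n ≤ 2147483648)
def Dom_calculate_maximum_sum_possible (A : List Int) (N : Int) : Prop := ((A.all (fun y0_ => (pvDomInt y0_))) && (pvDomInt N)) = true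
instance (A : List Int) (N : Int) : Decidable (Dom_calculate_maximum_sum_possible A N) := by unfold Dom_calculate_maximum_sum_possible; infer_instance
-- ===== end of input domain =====

-- B replaces A's enumeration of all combinations of the negatives by an enumeration of
-- per-distinct-negative-value removal counts (collapsing equal values); on inputs whose
-- first N entries are all nonnegative (N ≥ 1) with a nonzero entry after index 0, A's
-- sum(A) shortcut loses the position weights and B returns the weighted sum instead
-- (stated as the intended difference D_ below).


-- ===== PORT A =====
-- Python list.remove(v): ValueError when absent — that branch is unreachable here
-- (removed values are always drawn from the list), totalised by returning the list.
def pvRemove (B : List Int) (v : Int) : List Int :=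
  match PySem.List.remove? B v with
  | some B' => B'
  | none => B

def sigma_sum (arr : List Int) : Int :=
  (PySem.List.pyRange 0 (arr.length : Int) 1).foldl
    (fun sigma i => sigma + (PySem.List.pyGetD arr i 0) * (i + 1)) 0

-- A[i] raises IndexError when N > len(A); those inputs are outside Pre_ (pyGetD default unreached).
def calculate_maximum_sum_possible (A : List Int) (N : Int) : Int :=
  let parts := (PySem.List.pyRange 0 N 1).foldl
    (fun (st : List Int × List Int) i =>
      if PySem.List.pyGetD A i 0 < 0 then (st.1 ++ [PySem.List.pyGetD A i 0], st.2)
      else (st.1, st.2 ++ [PySem.List.pyGetD A i 0])) ([], [])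
  let negatives := parts.1
  let positives := parts.2
  if (negatives.length : Int) = N then 0
  else if (positives.length : Int) = N then A.sum
  else
    let negative_possibilities := (PySem.List.pyRange 0 (negatives.length : Int) 1).foldl
      (fun acc i => acc ++ [PySem.List.combinations negatives (i + 1).toNat]) []
    let sigma_list := negative_possibilities.foldl
      (fun sl comb => comb.foldl
        (fun sl tup => sl ++ [sigma_sum (tup.foldl (fun B v => pvRemove B v) A)]) sl)
      [sigma_sum A]
    (PySem.List.max? sigma_list (fun y => y)).getD 0

-- ===== PORT B =====
def calculate_maximum_sum_possible_alt (A : List Int) (N : Int) : Int :=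
  let st := (if 0 < N then PySem.List.slice A none (some N) else []).foldl
    (fun (st : PySem.Dict Int Int × Int) v =>
      if v < 0 then (PySem.Dict.insert st.1 v (PySem.Dict.getD st.1 v 0 + 1), st.2 + 1)
      else st)
    (PySem.Dict.empty, 0)
  let counts := st.1
  let nneg := st.2
  if nneg = N then 0
  else
    let candidates := counts.items.foldl
      (fun cands (vm : Int × Int) =>
        cands.foldl
          (fun new c =>
            ((PySem.List.pyRange 0 vm.2 1).foldl
              (fun (st : List (List Int) × List Int) _ =>
                (st.1 ++ [pvRemove st.2 vm.1], pvRemove st.2 vm.1))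
              (new ++ [c], c)).1)
          [])
      [A]
    let best := candidates.foldl
      (fun (best : Option Int) c =>
        let s := (PySem.List.enumerate c 0).foldl (fun s p => s + p.2 * (p.1 + 1)) 0
        match best with
        | none => some s
        | some b => if s > b then some s else some b)
      none
    best.getD 0

-- ===== PRECONDITION & SPEC =====
-- Pre_ excludes exactly the inputs with N > len(A), on which the Python A raises
-- IndexError while evaluating A[i].
def Pre_calculate_maximum_sum_possible (A : List Int) (N : Int) : Prop :=
  N ≤ (A.length : Int)
instance (A : List Int) (N : Int) : Decidable (Pre_calculate_maximum_sum_possible A N) := by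
  unfold Pre_calculate_maximum_sum_possible; infer_instance

def pvWitness_calculate_maximum_sum_possible : List Int × Int := ([1, -2], 2)

-- On inputs whose first N entries (N ≥ 1) are all nonnegative and which have a nonzero
-- entry after index 0, A returns the plain sum(A) while B returns the position-weighted
-- sum it maximises everywhere else; the weighted sum is the intended value.
def D_calculate_maximum_sum_possible (A : List Int) (N : Int) : Prop :=
  1 ≤ N ∧ (∀ x ∈ A.take N.toNat, 0 ≤ x) ∧
    ∃ i ∈ List.range A.length, 1 ≤ i ∧ A.getD i 0 ≠ 0
instance (A : List Int) (N : Int) : Decidable (D_calculate_maximum_sum_possible A N) := by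
  unfold D_calculate_maximum_sum_possible; infer_instance

def Spec_calculate_maximum_sum_possible (A : List Int) (N : Int) (out : Int) : Prop :=
  ¬ D_calculate_maximum_sum_possible A N → out = calculate_maximum_sum_possible_alt A N
instance (A : List Int) (N : Int) (out : Int) : Decidable (Spec_calculate_maximum_sum_possible A N out) := by
  unfold Spec_calculate_maximum_sum_possible; infer_instance

def pvDiffWitness_calculate_maximum_sum_possible : List Int × Int := ([0, 1], 2)
def pvDiffWitnessOut_calculate_maximum_sum_possible : Int × Int := (1, 2)

-- ===== CLAIM (what is proved, stated in full; the proofs are below) =====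
def Claim_unchanged_calculate_maximum_sum_possible : Prop :=
  ∀ (A : List Int) (N : Int), Dom_calculate_maximum_sum_possible A N →
    Pre_calculate_maximum_sum_possible A N →
    Spec_calculate_maximum_sum_possible A N (calculate_maximum_sum_possible A N)

def Claim_changed_calculate_maximum_sum_possible : Prop :=
  Dom_calculate_maximum_sum_possible (pvDiffWitness_calculate_maximum_sum_possible.1) (pvDiffWitness_calculate_maximum_sum_possible.2) ∧
  Pre_calculate_maximum_sum_possible (pvDiffWitness_calculate_maximum_sum_possible.1) (pvDiffWitness_calculate_maximum_sum_possible.2) ∧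
  D_calculate_maximum_sum_possible (pvDiffWitness_calculate_maximum_sum_possible.1) (pvDiffWitness_calculate_maximum_sum_possible.2) ∧
  calculate_maximum_sum_possible (pvDiffWitness_calculate_maximum_sum_possible.1) (pvDiffWitness_calculate_maximum_sum_possible.2) = pvDiffWitnessOut_calculate_maximum_sum_possible.1 ∧
  calculate_maximum_sum_possible_alt (pvDiffWitness_calculate_maximum_sum_possible.1) (pvDiffWitness_calculate_maximum_sum_possible.2) = pvDiffWitnessOut_calculate_maximum_sum_possible.2 ∧
  pvDiffWitnessOut_calculate_maximum_sum_possible.1 ≠ pvDiffWitnessOut_calculate_maximum_sum_possible.2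

-- ===== LEMMAS AND PROOFS =====

def negsOf (A : List Int) : List Int := A.filter (fun v => decide (v < 0))
def posOf (A : List Int) : List Int := A.filter (fun v => decide (¬ v < 0))

def wsum : List Int → Int → Int
  | [], _ => 0
  | x :: xs, p => x * p + wsum xs (p + 1)

lemma pvRemove_eq_erase (B : List Int) (v : Int) : pvRemove B v = B.erase v := by
  unfold pvRemove
  by_cases h : v ∈ B
  · rw [PySem.List.remove?_eq_some_erase B v h]
  · rw [(PySem.List.remove?_eq_none_iff B v).2 h, List.erase_of_not_mem h]


lemma foldl_pvRemove_eq (t c : List Int) :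
    t.foldl (fun B v => pvRemove B v) c = t.foldl List.erase c := by
  induction t generalizing c with
  | nil => rfl
  | cons v t ih => simp [List.foldl_cons, pvRemove_eq_erase]


lemma enumFold_eq_wsum (c : List Int) (s acc : Int) :
    (PySem.List.enumerate c s).foldl (fun s p => s + p.2 * (p.1 + 1)) acc = acc + wsum c (s + 1) := by
  induction c generalizing s acc with
  | nil => simp [PySem.List.enumerate, wsum]
  | cons x xs ih =>
      rw [PySem.List.enumerate_cons]
      simp only [List.foldl_cons, wsum, ih]
      ring


lemma sigma_eq_wsum (arr : List Int) :
    (PySem.List.pyRange 0 (arr.length : Int) 1).foldl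
      (fun sigma i => sigma + (PySem.List.pyGetD arr i 0) * (i + 1)) 0 = wsum arr 1 := by
  have h := PySem.List.enumerate_eq_map_pyRange (xs := arr) (d := 0)
  have h2 : (PySem.List.enumerate arr 0).foldl (fun s p => s + p.2 * (p.1 + 1)) 0
      = (PySem.List.pyRange 0 (arr.length : Int) 1).foldl
          (fun sigma i => sigma + (PySem.List.pyGetD arr i 0) * (i + 1)) 0 := by
    rw [h, List.foldl_map]
    simp [PySem.List.len_eq]
  rw [← h2, enumFold_eq_wsum]
  norm_num


lemma wsum_zero (c : List Int) (p : Int) (h : ∀ x ∈ c, x = 0) : wsum c p = 0 := by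
  induction c generalizing p with
  | nil => rfl
  | cons x xs ih =>
      have hx := h x (by simp)
      have hr := ih (p := p + 1) (fun y hy => h y (by simp [hy]))
      simp [wsum, hx, hr]


lemma foldl_part (l : List Int) (a b : List Int) :
    l.foldl (fun (st : List Int × List Int) x =>
      if x < 0 then (st.1 ++ [x], st.2) else (st.1, st.2 ++ [x])) (a, b)
    = (a ++ negsOf l, b ++ posOf l) := by
  induction l generalizing a b with
  | nil => simp [negsOf, posOf]
  | cons x xs ih =>
      by_cases hx : x < 0 <;>
        simp [List.foldl_cons, hx, ih, negsOf, posOf, List.filter_cons]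


lemma pos_len_iff (A : List Int) :
    ((posOf A).length : Int) = (A.length : Int) ↔ ∀ x ∈ A, ¬ x < 0 := by
  rw [Int.natCast_inj]
  unfold posOf
  rw [List.length_filter_eq_length_iff]
  simp


lemma sigmaList_mem (negs : List Int) (g : List Int → Int) (x : Int) :
    (x ∈ ((PySem.List.pyRange 0 (negs.length : Int) 1).foldl
        (fun acc i => acc ++ [PySem.List.combinations negs (i + 1).toNat]) []).foldl
        (fun sl comb => comb.foldl (fun sl tup => sl ++ [g tup]) sl) [g []])
    ↔ ∃ t : List Int, t.Sublist negs ∧ x = g t := by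
  have hnp : ((PySem.List.pyRange 0 (negs.length : Int) 1).foldl
      (fun acc i => acc ++ [PySem.List.combinations negs (i + 1).toNat]) [])
      = (List.range negs.length).map (fun k => PySem.List.combinations negs (k + 1)) := by
    rw [PySem.List.foldl_append_singleton_eq_map, PySem.List.pyRange_zero_nat, List.map_map]
    simp
  have hinner : ∀ (sl : List Int) (comb : List (List Int)),
      comb.foldl (fun sl tup => sl ++ [g tup]) sl = sl ++ comb.map g :=
    fun sl comb => by exact PySem.List.foldl_append_singleton_eq_map (f := g) (l := comb) (acc := sl)
  rw [hnp]
  simp only [hinner]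
  rw [PySem.List.foldl_append_eq_flatMap]
  simp only [List.singleton_append, List.mem_cons, List.mem_flatMap, List.mem_map,
    List.mem_range]
  constructor
  · rintro (rfl | ⟨cm, ⟨k, hk, rfl⟩, t, htm, rfl⟩)
    · exact ⟨[], List.nil_sublist _, rfl⟩
    · exact ⟨t, ((PySem.List.mem_combinations_iff _ _ _).1 htm).1, rfl⟩
  · rintro ⟨t, hsub, rfl⟩
    rcases t with _ | ⟨y, ys⟩
    · exact Or.inl rfl
    · right
      have h1 : (y :: ys).length ≤ negs.length := hsub.length_le
      refine ⟨PySem.List.combinations negs (ys.length + 1), ⟨ys.length, by simpa using h1, rfl⟩,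
        y :: ys, (PySem.List.mem_combinations_iff _ _ _).2 ⟨hsub, by simp⟩, rfl⟩


def iterE (c : List Int) (v : Int) : Nat → List Int
  | 0 => c
  | k + 1 => (iterE c v k).erase v

def blkL (c : List Int) (v : Int) (k : Nat) : List (List Int) :=
  (List.range (k + 1)).map (iterE c v)

def chain : List (Int × Int) → List Int → List (List Int)
  | [], c => [c]
  | vm :: l, c => (blkL c vm.1 vm.2.toNat).flatMap (chain l)

def countL : List (Int × Int) → Int → Nat
  | [], _ => 0
  | vm :: l, w => (if vm.1 = w then vm.2.toNat else 0) + countL l w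

-- counts dict of port B is the counter of the negatives

lemma counts_eq_counter (A : List Int) :
    A.foldl (fun (d : PySem.Dict Int Int) v =>
        if v < 0 then PySem.Dict.insert d v (PySem.Dict.getD d v 0 + 1) else d)
      PySem.Dict.empty = PySem.Dict.counter (negsOf A) := by
  rw [PySem.Dict.counter_eq_foldl]
  unfold negsOf
  rw [← PySem.List.foldl_ite_eq_foldl_filter (p := fun v : Int => v < 0)
    (f := fun (d : PySem.Dict Int Int) x => d.modify x 0 (· + 1))]
  rfl


-- the inner python loop ('for _ in range(m)') produces the successive erasures
lemma chainFold (v : Int) (k : Nat) (acc : List (List Int)) (c : List Int) :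
    ((PySem.List.pyRange 0 (k : Int) 1).foldl
      (fun (st : List (List Int) × List Int) _ =>
        (st.1 ++ [pvRemove st.2 v], pvRemove st.2 v)) (acc, c))
    = (acc ++ (List.range k).map (fun i => iterE c v (i + 1)), iterE c v k) := by
  induction k with
  | zero => simp [PySem.List.pyRange_one_eq_nil, iterE]
  | succ k ih =>
      have hcast : ((k : Int) + 1) = ((k + 1 : Nat) : Int) := by push_cast; ring
      rw [← hcast, PySem.List.pyRange_one_succ_right (by positivity), List.foldl_append, ih]
      simp [List.range_succ, pvRemove_eq_erase, iterE]

lemma pyRange_toNat (m : Int) : PySem.List.pyRange 0 m 1 = PySem.List.pyRange 0 (m.toNat : Int) 1 := by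
  by_cases h : 0 ≤ m
  · rw [Int.toNat_of_nonneg h]
  · rw [PySem.List.pyRange_one_eq_nil (by omega), PySem.List.pyRange_one_eq_nil (by omega)]

-- one step of port B's expansion, as a flatMap of blocks
lemma step_eq (cands : List (List Int)) (vm : Int × Int) :
    cands.foldl
      (fun new c =>
        ((PySem.List.pyRange 0 vm.2 1).foldl
          (fun (st : List (List Int) × List Int) _ =>
            (st.1 ++ [pvRemove st.2 vm.1], pvRemove st.2 vm.1))
          (new ++ [c], c)).1) []
    = cands.flatMap (fun c => blkL c vm.1 vm.2.toNat) := by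
  have hpt : ∀ (new : List (List Int)) (c : List Int),
      ((PySem.List.pyRange 0 vm.2 1).foldl
        (fun (st : List (List Int) × List Int) _ =>
          (st.1 ++ [pvRemove st.2 vm.1], pvRemove st.2 vm.1))
        (new ++ [c], c)).1 = new ++ blkL c vm.1 vm.2.toNat := by
    intro new c
    rw [pyRange_toNat, chainFold]
    unfold blkL
    rw [List.range_succ_eq_map]
    simp [iterE, List.append_assoc, Function.comp]
  simp only [hpt]
  exact PySem.List.foldl_append_eq_flatMap _ _ _


lemma foldl_flatMap_chain (l : List (Int × Int)) (cs : List (List Int)) :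
    l.foldl (fun cs vm => cs.flatMap (fun c => blkL c vm.1 vm.2.toNat)) cs
      = cs.flatMap (chain l) := by
  induction l generalizing cs with
  | nil => simp [chain]
  | cons vm l ih =>
      rw [List.foldl_cons, ih]
      rw [List.flatMap_assoc]
      rfl


lemma perm_foldl_erase {t t' : List Int} (h : t.Perm t') (c : List Int) :
    t.foldl List.erase c = t'.foldl List.erase c :=
  @List.Perm.foldl_eq _ _ _ _ _ ⟨fun _ _ _ => (List.erase_comm _ _).symm⟩ h c


lemma iterE_eq_foldl_replicate (c : List Int) (v : Int) (k : Nat) :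
    iterE c v k = (List.replicate k v).foldl List.erase c := by
  induction k with
  | zero => rfl
  | succ k ih => rw [iterE, ih, List.replicate_succ', List.foldl_append]; rfl


lemma mem_blkL {c x : List Int} {v : Int} {k : Nat} :
    x ∈ blkL c v k ↔ ∃ j ≤ k, x = iterE c v j := by
  unfold blkL
  simp only [List.mem_map, List.mem_range]
  constructor
  · rintro ⟨j, hj, rfl⟩; exact ⟨j, by omega, rfl⟩
  · rintro ⟨j, hj, rfl⟩; exact ⟨j, by omega, rfl⟩


lemma countL_eq_zero_of_not_mem_fst {l : List (Int × Int)} {v : Int}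
    (h : v ∉ l.map Prod.fst) : countL l v = 0 := by
  induction l with
  | nil => rfl
  | cons vm l ih =>
      simp only [List.map_cons, List.mem_cons] at h
      have h1 : v ≠ vm.1 := fun hh => h (Or.inl hh)
      have h2 : v ∉ l.map Prod.fst := fun hh => h (Or.inr hh)
      rw [countL, ih h2, if_neg (fun hh => h1 hh.symm)]


lemma count_nil_of_all_zero {t : List Int} (h : ∀ w, t.count w = 0) : t = [] := by
  cases t with
  | nil => rfl
  | cons y ys => have := h y; simp at this


lemma mem_chain (l : List (Int × Int)) (c : List Int) (x : List Int)
    (hnd : (l.map Prod.fst).Nodup) :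
    x ∈ chain l c ↔ ∃ t : List Int, (∀ w, t.count w ≤ countL l w) ∧ x = t.foldl List.erase c := by
  induction l generalizing c with
  | nil =>
      simp only [chain, List.mem_singleton]
      constructor
      · rintro rfl
        exact ⟨[], by intro w; simp [countL], rfl⟩
      · rintro ⟨t, hcnt, rfl⟩
        have ht : t = [] := count_nil_of_all_zero (fun w => Nat.le_zero.1 (by simpa [countL] using hcnt w))
        rw [ht]
        rfl
  | cons vm l ih =>
      obtain ⟨v, m⟩ := vm
      simp only [List.map_cons, List.nodup_cons] at hnd
      obtain ⟨hv, hnd'⟩ := hnd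
      simp only [chain, List.mem_flatMap]
      constructor
      · rintro ⟨b, hb, hx⟩
        obtain ⟨j, hj, rfl⟩ := mem_blkL.1 hb
        obtain ⟨t', hcnt', rfl⟩ := (ih _ hnd').1 hx
        refine ⟨List.replicate j v ++ t', ?_, ?_⟩
        · intro w
          rw [List.count_append, countL]
          dsimp only
          have h1 : (List.replicate j v).count w ≤ (if v = w then m.toNat else 0) := by
            rw [List.count_replicate]
            split_ifs with h1 h2 h2 <;> simp_all
          have h2 : t'.count w ≤ countL l w := hcnt' w
          omega
        · rw [List.foldl_append, ← iterE_eq_foldl_replicate]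
      · rintro ⟨t, hcnt, rfl⟩
        have hcl : countL l v = 0 := countL_eq_zero_of_not_mem_fst hv
        have hcnt_v := hcnt v
        rw [countL] at hcnt_v
        dsimp only at hcnt_v
        rw [if_pos rfl, hcl] at hcnt_v
        have hk : t.count v ≤ m.toNat := by omega
        have hfc : ∀ w, w ≠ v → (t.filter (fun u => decide (u ≠ v))).count w = t.count w :=
          fun w hw => List.count_filter (by simpa using hw)
        have hfv : (t.filter (fun u => decide (u ≠ v))).count v = 0 := by
          rw [List.count_eq_zero]
          intro hmem
          have h := List.of_mem_filter hmem
          simp at h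
        have hperm : t.Perm (List.replicate (t.count v) v ++ t.filter (fun u => decide (u ≠ v))) := by
          rw [List.perm_iff_count]
          intro w
          rw [List.count_append, List.count_replicate]
          by_cases hw : w = v
          · subst hw
            have h7 : List.count w (List.filter (fun u => !decide (u = w)) t) = 0 := by
              rw [List.count_eq_zero]
              intro hmem
              have h6 := List.of_mem_filter hmem
              simp at h6
            simp [h7]
          · have hbeq : (v == w) = false := by
              simp only [beq_eq_false_iff_ne, ne_eq]
              exact fun h => hw h.symm
            rw [hbeq, hfc w hw]
            simp
        refine ⟨iterE c v (t.count v), mem_blkL.2 ⟨t.count v, hk, rfl⟩, ?_⟩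
        refine (ih _ hnd').2 ⟨t.filter (fun u => decide (u ≠ v)), ?_, ?_⟩
        · intro w
          by_cases hw : w = v
          · subst hw
            rw [hfv]
            omega
          · have h2 := hcnt w
            rw [countL] at h2
            dsimp only at h2
            rw [if_neg (fun h => hw h.symm)] at h2
            rw [hfc w hw]
            omega
        · rw [perm_foldl_erase hperm, List.foldl_append, ← iterE_eq_foldl_replicate]



lemma countL_map_nodup (d : List Int) (f : Int → Nat) (w : Int) (hnd : d.Nodup) :
    countL (d.map (fun k => (k, (f k : Int)))) w = if w ∈ d then f w else 0 := by
  induction d with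
  | nil => simp [countL]
  | cons k d ih =>
      simp only [List.nodup_cons] at hnd
      rw [List.map_cons, countL]
      dsimp only
      rw [ih hnd.2]
      by_cases hw : k = w
      · subst hw
        simp [hnd.1]
      · have hiff : (w = k ∨ w ∈ d) ↔ w ∈ d := or_iff_right (fun h => hw h.symm)
        simp [hw, List.mem_cons, hiff]


lemma subperm_iff_counts {t negs : List Int} :
    t.Subperm negs ↔ ∀ w, t.count w ≤ negs.count w := by
  rw [List.subperm_ext_iff]
  constructor
  · intro h w
    by_cases hw : w ∈ t
    · exact h w hw
    · rw [List.count_eq_zero.2 hw]; omega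
  · intro h w _
    exact h w


-- the running-max loop of port B
lemma bestfold_some (l : List (List Int)) (b : Int) (w : List Int → Int) :
    l.foldl (fun (best : Option Int) c =>
        match best with
        | none => some (w c)
        | some bb => if w c > bb then some (w c) else some bb) (some b)
      = some (l.foldl (fun acc c => max acc (w c)) b) := by
  induction l generalizing b with
  | nil => rfl
  | cons c l ih =>
      simp only [List.foldl_cons]
      rw [← ih]
      congr 1
      by_cases h : w c > b
      · simp [h, max_eq_right (le_of_lt h)]
      · have h' : w c ≤ b := not_lt.1 h
        simp [h, max_eq_left h']


lemma foldl_maxproj_mem (l : List (List Int)) (b : Int) (w : List Int → Int) :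
    l.foldl (fun acc c => max acc (w c)) b = b ∨
      ∃ c ∈ l, l.foldl (fun acc c => max acc (w c)) b = w c := by
  induction l generalizing b with
  | nil => left; rfl
  | cons c l ih =>
      simp only [List.foldl_cons]
      rcases ih (max b (w c)) with h | ⟨c', hc', h⟩
      · by_cases hcb : w c ≤ b
        · left; rw [h, max_eq_left hcb]
        · right; exact ⟨c, by simp, by rw [h, max_eq_right (by omega)]⟩
      · right; exact ⟨c', by simp [hc'], h⟩




lemma sigma_sum_eq (arr : List Int) : sigma_sum arr = wsum arr 1 := by
  unfold sigma_sum; exact sigma_eq_wsum arr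


-- items of the counter of a list of negatives
lemma items_counter_negs (negs : List Int) :
    (PySem.Dict.counter negs).items
      = (PySem.Set.ofList negs : List Int).map (fun k => (k, (negs.count k : Int))) :=
  PySem.Dict.items_counter _

-- a pyRange loop reading A[i] for i < N is a loop over the prefix A[:N]
lemma foldl_pyRange_pyGetD_take {β : Type} (A : List Int) (N : Int)
    (hN : N ≤ (A.length : Int)) (f : β → Int → β) (init : β) :
    (PySem.List.pyRange 0 N 1).foldl (fun acc i => f acc (PySem.List.pyGetD A i 0)) init
      = (A.take N.toNat).foldl f init := by
  by_cases h0 : 0 < N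
  · have hlen : ((A.take N.toNat).length : Int) = N := by
      rw [List.length_take]
      omega
    have hcong : (PySem.List.pyRange 0 N 1).foldl
          (fun acc i => f acc (PySem.List.pyGetD A i 0)) init
        = (PySem.List.pyRange 0 N 1).foldl
          (fun acc i => f acc (PySem.List.pyGetD (A.take N.toNat) i 0)) init := by
      apply PySem.List.foldl_congr_mem
      intro acc i hi
      rw [PySem.List.mem_pyRange_one] at hi
      have hiA : i < (A.length : Int) := by omega
      rw [PySem.List.pyGetD_eq_getElem A 0 hi.1 hiA,
        PySem.List.pyGetD_eq_getElem (A.take N.toNat) 0 hi.1 (by omega)]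
      rw [List.getElem_take]
    have hmain := PySem.List.foldl_pyRange_zero_pyGetD' (A.take N.toNat) 0 f init
    rw [hlen] at hmain
    exact hcong.trans hmain
  · rw [PySem.List.pyRange_one_eq_nil (by omega)]
    have : N.toNat = 0 := by omega
    rw [this]
    rfl

-- the values reachable by removing (first occurrences of) a sub-multiset of negs from A
def Achieves (negs A : List Int) (x : Int) : Prop :=
  ∃ t : List Int, t.Subperm negs ∧ x = wsum (t.foldl List.erase A) 1

-- what the else-branch of port B computes: the maximum achievable weighted sum
lemma B_tail_char (negs A : List Int) :
    ∃ M, (((PySem.Dict.counter negs).items.foldl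
        (fun cands (vm : Int × Int) =>
          cands.foldl
            (fun new c =>
              ((PySem.List.pyRange 0 vm.2 1).foldl
                (fun (st : List (List Int) × List Int) _ =>
                  (st.1 ++ [pvRemove st.2 vm.1], pvRemove st.2 vm.1))
                (new ++ [c], c)).1)
            [])
        [A]).foldl
        (fun (best : Option Int) c =>
          let s := (PySem.List.enumerate c 0).foldl (fun s p => s + p.2 * (p.1 + 1)) 0
          match best with
          | none => some s
          | some b => if s > b then some s else some b)
        none).getD 0 = M ∧ Achieves negs A M ∧
      ∀ x, Achieves negs A x → x ≤ M := by
  rw [items_counter_negs]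
  simp only [step_eq]
  rw [foldl_flatMap_chain]
  simp only [List.flatMap_cons, List.flatMap_nil, List.append_nil]
  simp only [enumFold_eq_wsum, zero_add]
  set L := (PySem.Set.ofList negs : List Int).map
      (fun k => (k, (negs.count k : Int))) with hL
  have hnd : (L.map Prod.fst).Nodup := by
    rw [hL, List.map_map]
    have : (Prod.fst ∘ fun k => (k, (negs.count k : Int))) = id := rfl
    rw [this, List.map_id]
    exact PySem.Set.nodup_ofList _
  have hcountL : ∀ w, countL L w = negs.count w := by
    intro w
    rw [hL, countL_map_nodup _ _ _ (PySem.Set.nodup_ofList _)]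
    by_cases hw : w ∈ (PySem.Set.ofList negs : List Int)
    · rw [if_pos hw]
    · rw [if_neg hw, Eq.comm, List.count_eq_zero]
      exact fun hmem => hw ((PySem.Set.mem_ofList _ _).2 hmem)
  have hmem : ∀ c, c ∈ chain L A ↔ ∃ t : List Int, t.Subperm negs ∧ c = t.foldl List.erase A := by
    intro c
    rw [mem_chain _ _ _ hnd]
    constructor
    · rintro ⟨t, hcnt, rfl⟩
      exact ⟨t, subperm_iff_counts.2 (fun w => by rw [← hcountL w]; exact hcnt w), rfl⟩
    · rintro ⟨t, hsub, rfl⟩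
      exact ⟨t, fun w => by rw [hcountL w]; exact subperm_iff_counts.1 hsub w, rfl⟩
  have hA : A ∈ chain L A := (hmem A).2 ⟨[], List.nil_subperm, rfl⟩
  rcases hch : chain L A with _ | ⟨c0, rest⟩
  · rw [hch] at hA; simp at hA
  · rw [hch] at hmem hA
    simp only [List.foldl_cons]
    rw [bestfold_some rest (wsum c0 1) (fun c => wsum c 1)]
    simp only [Option.getD_some]
    refine ⟨_, rfl, ?_, ?_⟩
    · rcases foldl_maxproj_mem rest (wsum c0 1) (fun c => wsum c 1) with h | ⟨c', hc', h⟩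
      · rw [h]
        obtain ⟨t, hsub, hc⟩ := (hmem c0).1 (by simp)
        exact ⟨t, hsub, by rw [← hc]⟩
      · rw [h]
        obtain ⟨t, hsub, hc⟩ := (hmem c').1 (by simp [hc'])
        exact ⟨t, hsub, by rw [← hc]⟩
    · rintro x ⟨t, hsub, rfl⟩
      have hc : t.foldl List.erase A ∈ c0 :: rest := (hmem _).2 ⟨t, hsub, rfl⟩
      have hmax := PySem.List.le_foldl_max_int rest (fun c => wsum c 1) (wsum c0 1)
      rcases List.mem_cons.1 hc with h | h
      · rw [h]; exact hmax.1
      · exact hmax.2 _ h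

-- what the else-branch of port A computes: the same maximum
lemma A_tail_char (negs A : List Int) :
    ∃ M, ((PySem.List.max? (((PySem.List.pyRange 0 (negs.length : Int) 1).foldl
        (fun acc i => acc ++ [PySem.List.combinations negs (i + 1).toNat]) []).foldl
        (fun sl comb => comb.foldl
          (fun sl tup => sl ++ [sigma_sum (tup.foldl (fun B v => pvRemove B v) A)]) sl)
        [sigma_sum A]) (fun y => y)).getD 0) = M ∧ Achieves negs A M ∧
      ∀ x, Achieves negs A x → x ≤ M := by
  have hmem := fun x => sigmaList_mem negs
    (fun tup => sigma_sum (tup.foldl (fun B v => pvRemove B v) A)) x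
  have hval : ∀ t : List Int,
      sigma_sum (t.foldl (fun B v => pvRemove B v) A) = wsum (t.foldl List.erase A) 1 := by
    intro t
    rw [foldl_pvRemove_eq, sigma_sum_eq]
  set sl := ((PySem.List.pyRange 0 (negs.length : Int) 1).foldl
      (fun acc i => acc ++ [PySem.List.combinations negs (i + 1).toNat]) []).foldl
      (fun sl comb => comb.foldl
        (fun sl tup => sl ++ [sigma_sum (tup.foldl (fun B v => pvRemove B v) A)]) sl)
      [sigma_sum A] with hsl
  have hselfmem : sigma_sum A ∈ sl := by
    rw [hsl]
    exact (hmem _).2 ⟨[], List.nil_sublist _, rfl⟩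
  rcases hmx : PySem.List.max? sl (fun y => y) with _ | M
  · rw [(PySem.List.max?_eq_none_iff sl (fun y => y)).1 hmx] at hselfmem
    simp at hselfmem
  · simp only [Option.getD_some]
    refine ⟨M, rfl, ?_, ?_⟩
    · obtain ⟨t, hsub, hMt⟩ := (hmem M).1 (PySem.List.max?_mem hmx)
      exact ⟨t, hsub.subperm, by rw [hMt, hval]⟩
    · rintro x ⟨t, hsub, rfl⟩
      obtain ⟨s, hps, hss⟩ := hsub
      have hx : wsum (t.foldl List.erase A) 1 ∈ sl := by
        rw [← perm_foldl_erase hps, ← hval s]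
        exact (hmem _).2 ⟨s, hss, rfl⟩
      exact PySem.List.max?_isMax hmx _ hx

lemma sum_eq_wsum_of_zeros (A : List Int)
    (h : ∀ i ∈ List.range A.length, 1 ≤ i → A.getD i 0 = 0) :
    A.sum = wsum A 1 := by
  cases A with
  | nil => rfl
  | cons x xs =>
      have hzs : ∀ y ∈ xs, y = 0 := by
        intro y hy
        obtain ⟨j, hj, rfl⟩ := List.getElem_of_mem hy
        have hi : (j + 1) ∈ List.range (x :: xs).length := by
          simp; omega
        have hgd : (x :: xs).getD (j + 1) 0 = xs[j] := by
          rw [List.getD_cons_succ, List.getD_eq_getElem _ _ hj]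
        have := h (j + 1) hi (by omega)
        rw [hgd] at this
        exact this
      have hsum : xs.sum = 0 := List.sum_eq_zero hzs
      rw [List.sum_cons, hsum, wsum, wsum_zero xs (1 + 1) hzs]
      ring

-- the prefix considered by both ports
lemma prefix_eq (A : List Int) (N : Int) :
    (if 0 < N then PySem.List.slice A none (some N) else []) = A.take N.toNat := by
  by_cases h0 : 0 < N
  · rw [if_pos h0, PySem.List.slice_to A (by omega)]
  · rw [if_neg h0]
    have : N.toNat = 0 := by omega
    rw [this]
    rfl

-- the single counting loop of port B is the pair (counter of negatives, their number)
lemma count_loop_eq (P : List Int) :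
    P.foldl
      (fun (st : PySem.Dict Int Int × Int) v =>
        if v < 0 then (PySem.Dict.insert st.1 v (PySem.Dict.getD st.1 v 0 + 1), st.2 + 1)
        else st)
      (PySem.Dict.empty, 0)
    = (PySem.Dict.counter (negsOf P), ((negsOf P).length : Int)) := by
  have hsplit : (fun (st : PySem.Dict Int Int × Int) (v : Int) =>
        if v < 0 then (PySem.Dict.insert st.1 v (PySem.Dict.getD st.1 v 0 + 1), st.2 + 1)
        else st)
      = (fun (st : PySem.Dict Int Int × Int) (v : Int) =>
        ((fun (d : PySem.Dict Int Int) v =>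
            if v < 0 then PySem.Dict.insert d v (PySem.Dict.getD d v 0 + 1) else d) st.1 v,
         (fun (a : Int) (v : Int) => if v < 0 then a + 1 else a) st.2 v)) := by
    funext st v
    by_cases h : v < 0 <;> simp [h]
  rw [hsplit, PySem.List.foldl_prod_mk
    (f := fun (d : PySem.Dict Int Int) (v : Int) =>
      if v < 0 then PySem.Dict.insert d v (PySem.Dict.getD d v 0 + 1) else d)
    (g := fun (a : Int) (v : Int) => if v < 0 then a + 1 else a)]
  rw [counts_eq_counter, PySem.List.foldl_ite_add_one (fun v : Int => v < 0)]
  unfold negsOf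
  rw [List.countP_eq_length_filter]
  simp

theorem calculate_maximum_sum_possible_spec_aux (A : List Int) (N : Int)
    (hpre : N ≤ (A.length : Int))
    (hndiff : ¬ D_calculate_maximum_sum_possible A N) :
    calculate_maximum_sum_possible A N = calculate_maximum_sum_possible_alt A N := by
  simp only [calculate_maximum_sum_possible, calculate_maximum_sum_possible_alt]
  rw [foldl_pyRange_pyGetD_take A N hpre
    (f := fun (st : List Int × List Int) x =>
      if x < 0 then (st.1 ++ [x], st.2) else (st.1, st.2 ++ [x]))]
  rw [foldl_part, prefix_eq, count_loop_eq]
  simp only [List.nil_append]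
  set P := A.take N.toNat with hP
  by_cases hc1 : ((negsOf P).length : Int) = N
  · rw [if_pos hc1, if_pos hc1]
  · rw [if_neg hc1, if_neg hc1]
    by_cases hc2 : ((posOf P).length : Int) = N
    · -- A returns sum(A); since D_ fails, it equals the weighted sum B computes
      rw [if_pos hc2]
      have h0N : 0 ≤ N := by
        rw [← hc2]
        exact Int.natCast_nonneg _
      have hPlen : (P.length : Int) = N := by
        rw [hP, List.length_take]
        omega
      have hall : ∀ x ∈ P, ¬ x < 0 := by
        apply (pos_len_iff P).1
        rw [hPlen, hc2]
      have hN1 : 1 ≤ N := by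
        rcases eq_or_lt_of_le h0N with h | h
        · exfalso
          apply hc1
          have hP0 : P = [] := by
            rw [hP, show N.toNat = 0 by omega]
            exact List.take_zero
          rw [hP0, show negsOf ([] : List Int) = [] from rfl]
          simpa using h
        · omega
      have hfe : negsOf P = [] := by
        unfold negsOf
        exact List.filter_eq_nil_iff.2 (fun x hx => by simpa using hall x hx)
      obtain ⟨M, hB, hachB, _⟩ := B_tail_char (negsOf P) A
      rw [hB]
      obtain ⟨t, hsub, hMt⟩ := hachB
      rw [hfe, List.subperm_nil] at hsub
      subst hsub
      simp only [List.foldl_nil] at hMt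
      have hzeros : ∀ i ∈ List.range A.length, 1 ≤ i → A.getD i 0 = 0 := by
        intro i hi h1i
        by_contra hne
        exact hndiff ⟨hN1, fun x hx => by have := hall x hx; omega,
          ⟨i, hi, h1i, hne⟩⟩
      rw [hMt, sum_eq_wsum_of_zeros A hzeros]
    · rw [if_neg hc2]
      obtain ⟨M, hA, hachA, hbdA⟩ := A_tail_char (negsOf P) A
      obtain ⟨M', hB, hachB, hbdB⟩ := B_tail_char (negsOf P) A
      rw [hA, hB]
      exact le_antisymm (hbdB M hachA) (hbdA M' hachB)

-- ===== VERDICT (by name: the statement is the Claim_ definition above) =====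
theorem calculate_maximum_sum_possible_spec : Claim_unchanged_calculate_maximum_sum_possible := by
  intro A N hdom hpre hndiff
  exact calculate_maximum_sum_possible_spec_aux A N hpre hndiff

theorem calculate_maximum_sum_possible_changed : Claim_changed_calculate_maximum_sum_possible := by
  unfold Claim_changed_calculate_maximum_sum_possible; decide
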